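-- pv_equiv track=rewrite | github.com/alexnguyen2201/Algorithm | Algorithms/NumberTheory/nearst_prime_lib.py | closest_prime
-- ===== SOURCE A (Python) =====
-- def closest_prime(n):
--     if n <= 1:  # handle 0 & 1 as special cases
--         return 2
--
--     sieve_limit = 2 * n
--
--     sieve = [False, False] + [True] * (sieve_limit - 2)
--
--     prime_candidate = number = 2
--
--     while number < sieve_limit:
--         if sieve[number]:
--             if number == n:
--                 return n  # n is prime
--
--             if number > n:
--                 if (number - n) < (n - prime_candidate):
--                     return number
--
--                 return prime_candidate
--
--             prime_candidate = number
--
--             sieve_limit = 2 * n - prime_candidate  # reduce sieve size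
--
--             for index in range(number * number, sieve_limit, number):
--                 sieve[index] = False
--
--         number += 1
--
--     return prime_candidate  # ran off end of sieve
-- ===== SOURCE B (Python) =====
-- def _is_prime(m):
--     if m < 2:
--         return False
--     d = 2
--     while d * d <= m:
--         if m % d == 0:
--             return False
--         d += 1
--     return True
--
--
-- def closest_prime(n):
--     if n <= 1:
--         return 2
--     if _is_prime(n):
--         return n
--     d = 1
--     while True:
--         if _is_prime(n - d):
--             return n - d
--         if _is_prime(n + d):
--             return n + d
--         d += 1
-- ===== Notes on version B (the rewrite author's own statement) =====
-- stated objective: faster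
-- what changed: Replaces A's Eratosthenes sieve of size proportional to n by an outward search from n (testing n-d before n+d, preserving the tie-break to the smaller prime) using trial-division primality, so work is proportional to the prime gap around n instead of to n.
import Mathlib
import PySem

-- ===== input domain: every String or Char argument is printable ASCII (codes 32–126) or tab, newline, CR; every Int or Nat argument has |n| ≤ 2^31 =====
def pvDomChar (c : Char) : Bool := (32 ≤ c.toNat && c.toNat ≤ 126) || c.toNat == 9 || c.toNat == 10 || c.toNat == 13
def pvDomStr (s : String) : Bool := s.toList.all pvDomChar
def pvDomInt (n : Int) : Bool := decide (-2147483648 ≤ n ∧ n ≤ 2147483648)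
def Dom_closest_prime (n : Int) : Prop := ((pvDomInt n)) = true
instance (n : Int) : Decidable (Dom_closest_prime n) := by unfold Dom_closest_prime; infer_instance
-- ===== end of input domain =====

-- B replaces A's full Eratosthenes sieve by an outward search from n
-- (checking n-d before n+d, keeping A's tie-break to the smaller prime) with
-- trial-division primality; same return value everywhere.

-- ===== PORT A =====

-- inner loop `for index in range(number*number, sieve_limit, number): sieve[index] = False`
-- (step is always ≥ 2 at the call site, so Python's range never raises)
def pvMarkA (sieve : Array Bool) (start limit step : Nat) : Array Bool :=
  if h : start < limit ∧ 0 < step then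
    pvMarkA (sieve.setIfInBounds start false) (start + step) limit step
  else sieve
termination_by limit - start
decreasing_by omega

-- the `while number < sieve_limit` loop; fuel only guards totality: it starts at
-- 2*N, an upper bound on the remaining iterations, and on exhaustion returns the
-- same `prime_candidate` that the normal loop exit returns
def pvLoopA (N fuel : Nat) (sieve : Array Bool) (limit pc number : Nat) : Int :=
  match fuel with
  | 0 => (pc : Int)
  | fuel + 1 =>
    if number < limit then
      if sieve.getD number false then
        if number = N then (N : Int)
        else if N < number then
          (if number - N < N - pc then (number : Int) else (pc : Int))
        else
          pvLoopA N fuel (pvMarkA sieve (number * number) (2 * N - number) number)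
            (2 * N - number) number (number + 1)
      else pvLoopA N fuel sieve limit pc (number + 1)
    else (pc : Int)

def closest_prime (n : Int) : Int :=
  if n ≤ 1 then 2
  else
    pvLoopA n.toNat (2 * n.toNat)
      (#[false, false] ++ Array.replicate (2 * n.toNat - 2) true)
      (2 * n.toNat) 2 2

-- ===== PORT B =====

-- `while d * d <= m: if m % d == 0: return False; d += 1` of _is_prime
def pvTrial (m d : Int) : Bool :=
  if h : d * d ≤ m then
    if PySem.Int.mod m d = 0 then false
    else pvTrial m (d + 1)
  else true
termination_by (m + 1 - d).toNat
decreasing_by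
  have hdm : d ≤ m := by nlinarith [sq_nonneg (d - 1)]
  omega

def pvIsPrime (m : Int) : Bool :=
  if m < 2 then false else pvTrial m 2

-- the `while True` outward search; fuel only guards totality: n.toNat bounds the
-- number of iterations (the search hits a prime at d = n - prevprime(n-1) at the latest)
def pvSearchB (n d : Int) (fuel : Nat) : Int :=
  match fuel with
  | 0 => n
  | fuel + 1 =>
    if pvIsPrime (n - d) then n - d
    else if pvIsPrime (n + d) then n + d
    else pvSearchB n (d + 1) fuel

def closest_prime_alt (n : Int) : Int :=
  if n ≤ 1 then 2
  else if pvIsPrime n then n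
  else pvSearchB n 1 n.toNat

-- ===== PRECONDITION & SPEC =====
def Spec_closest_prime (n : Int) (out : Int) : Prop := out = closest_prime_alt n
instance (n : Int) (out : Int) : Decidable (Spec_closest_prime n out) := by unfold Spec_closest_prime; infer_instance

-- ===== CLAIM (what is proved, stated in full; the proofs are below) =====
def Claim_equal_closest_prime : Prop := ∀ (n : Int), Dom_closest_prime n → Spec_closest_prime n (closest_prime n)

-- ===== LEMMAS AND PROOFS =====

-- the least prime ≥ m
def pvNextP (m : Nat) : Nat := Nat.find (Nat.exists_infinite_primes m)
-- the greatest prime ≤ m (0 if none)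
def pvPrevP (m : Nat) : Nat := Nat.findGreatest Nat.Prime m

-- the common mathematical value both programs compute for n.toNat = N ≥ 2
def pvAnswer (N : Nat) : Int :=
  if Nat.Prime N then (N : Int)
  else if pvNextP (N + 1) - N < N - pvPrevP (N - 1) then (pvNextP (N + 1) : Int)
  else (pvPrevP (N - 1) : Int)

-- A's outer loop with the sieve test replaced by primality and the limit by 2N - pc
def pvIdeal (N pc number : Nat) : Int :=
  if h : number < 2 * N - pc then
    if Nat.Prime number then
      if number = N then (N : Int)
      else if N < number then
        (if number - N < N - pc then (number : Int) else (pc : Int))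
      else pvIdeal N number (number + 1)
    else pvIdeal N pc (number + 1)
  else (pc : Int)
termination_by 2 * N - number
decreasing_by all_goals omega

-- sieve invariant: below `limit`, a cell is true iff it is ≥ 2 and survived marking
-- by every prime ≤ pc
def pvGood (sieve : Array Bool) (pc limit : Nat) : Prop :=
  ∀ m, m < limit →
    (sieve.getD m false = true ↔
      (2 ≤ m ∧ ∀ r, Nat.Prime r → r ≤ pc → ¬(r ∣ m ∧ r * r ≤ m)))

theorem pvGetD_setIfInBounds (a : Array Bool) (i j : Nat) (v : Bool) :
    (a.setIfInBounds i v).getD j false =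
      if i = j ∧ j < a.size then v else a.getD j false := by
  rw [Array.getD_eq_getD_getElem?, Array.getD_eq_getD_getElem?, Array.getElem?_setIfInBounds]
  rcases eq_or_ne i j with rfl | hne
  · by_cases hj : i < a.size
    · simp [hj]
    · simp [hj, Array.getElem?_eq_none (by omega : a.size ≤ i)]
  · simp [hne]

theorem pvGetD_oob (a : Array Bool) (j : Nat) (h : a.size ≤ j) : a.getD j false = false := by
  rw [Array.getD_eq_getD_getElem?, Array.getElem?_eq_none h]; rfl

theorem pvMarkA_getD (sieve : Array Bool) (start limit step m : Nat) (hs : 0 < step) :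
    (pvMarkA sieve start limit step).getD m false =
      if start ≤ m ∧ m < limit ∧ step ∣ (m - start) then false
      else sieve.getD m false := by
  fun_induction pvMarkA sieve start limit step with
  | case1 sieve start h ih =>
    rw [ih, pvGetD_setIfInBounds]
    rcases eq_or_ne start m with rfl | hne
    · have hC1 : ¬(start + step ≤ start ∧ start < limit ∧ step ∣ start - (start + step)) := by
        omega
      rw [if_neg hC1]
      by_cases hsz : start < sieve.size
      · rw [if_pos ⟨rfl, hsz⟩, if_pos ⟨le_refl _, h.1, ⟨0, by omega⟩⟩]
      · rw [if_neg (by tauto), pvGetD_oob sieve start (by omega),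
          if_pos ⟨le_refl _, h.1, ⟨0, by omega⟩⟩]
    · have hiff : (start + step ≤ m ∧ m < limit ∧ step ∣ m - (start + step)) ↔
          (start ≤ m ∧ m < limit ∧ step ∣ m - start) := by
        constructor
        · rintro ⟨h1, h2, c, hc⟩
          refine ⟨by omega, h2, ⟨c + 1, ?_⟩⟩
          have : step * (c + 1) = step * c + step := by ring
          omega
        · rintro ⟨h1, h2, c, hc⟩
          have hsm : start < m := by omega
          rcases c with _ | c
          · omega
          · have he : step * (c + 1) = step * c + step := by ring
            exact ⟨by omega, h2, ⟨c, by omega⟩⟩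
      rw [if_neg (fun hx : start = m ∧ m < sieve.size => hne hx.1), if_congr hiff rfl rfl]
  | case2 sieve start h =>
    rw [if_neg (by omega)]

theorem pvInit_getD (k m : Nat) :
    ((#[false, false] ++ Array.replicate k true) : Array Bool).getD m false =
      decide (2 ≤ m ∧ m < k + 2) := by
  rw [Array.getD_eq_getD_getElem?, Array.getElem?_append]
  have h2 : (#[false, false] : Array Bool).size = 2 := rfl
  rw [h2, Array.getElem?_replicate]
  by_cases hm : m < 2
  · interval_cases m <;> simp
  · simp only [if_neg hm]
    by_cases hk : m - 2 < k
    · simp [hk]; omega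
    · simp [hk]; omega

theorem pvTrial_iff (m d : Int) (hd : 2 ≤ d) :
    pvTrial m d = true ↔ ∀ e : Int, d ≤ e → e * e ≤ m → ¬(e ∣ m) := by
  fun_induction pvTrial m d with
  | case1 d h hmod =>
    simp only [Bool.false_eq_true, false_iff]
    intro hall
    exact hall d (le_refl d) h ((PySem.Int.mod_eq_zero_iff_dvd m d).mp hmod)
  | case2 d h hmod ih =>
    rw [ih (by omega)]
    constructor
    · intro hall e he hee hdvd
      rcases eq_or_lt_of_le he with heq | hlt
      · subst heq
        exact hmod ((PySem.Int.mod_eq_zero_iff_dvd m d).mpr hdvd)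
      · exact hall e (by omega) hee hdvd
    · intro hall e he hee hdvd
      exact hall e (by omega) hee hdvd
  | case3 d h =>
    simp only [true_iff]
    intro e he hee hdvd
    have : d * d ≤ e * e := by nlinarith
    omega

theorem pvIsPrime_iff (m : Int) :
    pvIsPrime m = true ↔ (2 ≤ m ∧ Nat.Prime m.toNat) := by
  unfold pvIsPrime
  by_cases hm : m < 2
  · simp [hm]
  · push_neg at hm
    rw [if_neg (by omega)]
    have hmN : ((m.toNat : Int)) = m := by omega
    rw [pvTrial_iff m 2 (le_refl 2)]
    constructor
    · intro hall
      refine ⟨hm, ?_⟩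
      by_contra hnp
      have h0 : 0 < m.toNat := by omega
      have hr := Nat.minFac_prime (n := m.toNat) (by omega)
      have hrd := Nat.minFac_dvd m.toNat
      have hrsq := Nat.minFac_sq_le_self h0 hnp
      set r := m.toNat.minFac with hrdef
      have h2r : 2 ≤ r := hr.two_le
      refine hall (r : Int) (by exact_mod_cast h2r) ?_ ?_
      · have : (r : Int) * r = ((r * r : Nat) : Int) := by push_cast; ring
        rw [this, ← hmN]
        exact_mod_cast (by nlinarith [hrsq] : r * r ≤ m.toNat)
      · rw [← hmN]
        exact_mod_cast hrd
    · rintro ⟨-, hp⟩ e he hee hdvd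
      have he0 : 0 ≤ e := by omega
      have heN : ((e.toNat : Int)) = e := by omega
      have hdvdN : e.toNat ∣ m.toNat := by
        rw [← Int.natCast_dvd_natCast, heN, hmN]; exact hdvd
      have helt : e < m := by nlinarith
      have := (Nat.prime_def_lt'.mp hp).2 e.toNat (by omega) (by omega)
      exact this hdvdN

theorem pvNextP_spec (m : Nat) : m ≤ pvNextP m ∧ Nat.Prime (pvNextP m) :=
  Nat.find_spec (Nat.exists_infinite_primes m)

theorem pvNextP_le {m p : Nat} (hp : Nat.Prime p) (hmp : m ≤ p) : pvNextP m ≤ p :=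
  Nat.find_min' (Nat.exists_infinite_primes m) ⟨hmp, hp⟩

theorem pvNextP_succ {m : Nat} (h : ¬Nat.Prime m) : pvNextP (m + 1) = pvNextP m := by
  have h1 := pvNextP_spec m
  have h2 := pvNextP_spec (m + 1)
  have hle : pvNextP m ≤ pvNextP (m + 1) := pvNextP_le h2.2 (by omega)
  have hge : pvNextP (m + 1) ≤ pvNextP m := by
    apply pvNextP_le h1.2
    rcases Nat.eq_or_lt_of_le h1.1 with heq | hlt
    · exact absurd (heq ▸ h1.2) h
    · omega
  omega

theorem pvNextP_eq_self {m : Nat} (h : Nat.Prime m) : pvNextP m = m :=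
  Nat.le_antisymm (pvNextP_le h (le_refl m)) (pvNextP_spec m).1

theorem pvIdeal_after (N : Nat) (hN : 2 ≤ N) :
    ∀ number pc, Nat.Prime pc → pc < N → N < number →
      (∀ r, pc < r → r < number → ¬Nat.Prime r) →
      pvIdeal N pc number =
        if pvNextP number - N < N - pc then (pvNextP number : Int) else (pc : Int) := by
  intro number pc hpc hpcN hNn hall
  have hq := pvNextP_spec number
  rw [pvIdeal]
  by_cases hlim : number < 2 * N - pc
  · rw [dif_pos hlim]
    by_cases hpr : Nat.Prime number
    · have hqe : pvNextP number = number := pvNextP_eq_self hpr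
      rw [if_pos hpr, if_neg (show ¬(number = N) from by omega), if_pos hNn, hqe]
    · rw [if_neg hpr]
      have := pvIdeal_after N hN (number + 1) pc hpc hpcN (by omega)
        (by intro r h1 h2; rcases Nat.lt_or_ge r number with h3 | h3
            · exact hall r h1 h3
            · have : r = number := by omega
              subst this; exact hpr)
      rw [this, pvNextP_succ hpr]
  · rw [dif_neg hlim]
    have : ¬(pvNextP number - N < N - pc) := by omega
    rw [if_neg this]
termination_by number => 2 * N - number
decreasing_by omega

theorem pvIdeal_before (N : Nat) (hN : 2 ≤ N) :
    ∀ number pc, Nat.Prime pc → pc < number → number ≤ N →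
      (∀ r, pc < r → r < number → ¬Nat.Prime r) →
      pvIdeal N pc number = pvAnswer N := by
  intro number pc hpc hlt hle hall
  have hpcN : pc < N := by omega
  rw [pvIdeal, dif_pos (by omega)]
  by_cases hpr : Nat.Prime number
  · by_cases hnum : number = N
    · subst hnum
      rw [if_pos hpr, if_pos rfl, pvAnswer, if_pos hpr]
    · rw [if_pos hpr, if_neg hnum, if_neg (show ¬(N < number) from by omega)]
      exact pvIdeal_before N hN (number + 1) number hpr (by omega) (by omega)
        (by intro r h1 h2; omega)
  · rw [if_neg hpr]
    by_cases hnum : number = N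
    · subst hnum
      have hall' : ∀ r, pc < r → r < number + 1 → ¬Nat.Prime r := by
        intro r h1 h2
        rcases Nat.lt_or_ge r number with h3 | h3
        · exact hall r h1 h3
        · have : r = number := by omega
          subst this; exact hpr
      rw [pvIdeal_after number hN (number + 1) pc hpc hpcN (by omega) hall']
      have hprev : pvPrevP (number - 1) = pc := by
        rw [pvPrevP, Nat.findGreatest_eq_iff]
        exact ⟨by omega, fun _ => hpc, fun r h1 h2 => hall r h1 (by omega)⟩
      rw [pvAnswer, if_neg hpr, hprev]
    · exact pvIdeal_before N hN (number + 1) pc hpc (by omega) (by omega)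
        (by intro r h1 h2
            rcases Nat.lt_or_ge r number with h3 | h3
            · exact hall r h1 h3
            · have : r = number := by omega
              subst this; exact hpr)
termination_by number => N - number
decreasing_by all_goals omega

theorem pvSieve_prime_iff (sieve : Array Bool) (pc limit number : Nat)
    (hg : pvGood sieve pc limit) (hnum : number < limit) (h2 : 2 ≤ number)
    (hpclt : pc < number)
    (hall : ∀ r, pc < r → r < number → ¬Nat.Prime r) :
    (sieve.getD number false = true) ↔ Nat.Prime number := by
  rw [hg number hnum]
  constructor
  · rintro ⟨-, hforall⟩
    by_contra hnp
    have hr := Nat.minFac_prime (n := number) (by omega)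
    have hrd := Nat.minFac_dvd number
    have hrsq := Nat.minFac_sq_le_self (by omega) hnp
    have hrle : number.minFac ≤ number := Nat.minFac_le (by omega)
    have hrlt : number.minFac < number := by
      rcases Nat.eq_or_lt_of_le hrle with heq | hlt
      · exact absurd (heq ▸ hr) hnp
      · exact hlt
    have hrpc : number.minFac ≤ pc := by
      by_contra hgt
      exact hall _ (by omega) hrlt hr
    exact hforall _ hr hrpc ⟨hrd, by nlinarith [hrsq]⟩
  · intro hpr
    refine ⟨hpr.two_le, fun r hrp hrpc hc => ?_⟩
    rcases (Nat.Prime.eq_one_or_self_of_dvd hpr r hc.1) with h1 | h1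
    · exact absurd h1 (by have := hrp.two_le; omega)
    · omega

theorem pvGood_step (N pc number : Nat) (sieve : Array Bool)
    (hpr : Nat.Prime number) (hlt : pc < number)
    (hall : ∀ r, pc < r → r < number → ¬Nat.Prime r)
    (hg : pvGood sieve pc (2 * N - pc)) :
    pvGood (pvMarkA sieve (number * number) (2 * N - number) number)
      number (2 * N - number) := by
  intro m hm
  rw [pvMarkA_getD _ _ _ _ _ (by have := hpr.two_le; omega)]
  have hm' : m < 2 * N - pc := by omega
  have hold := hg m hm'
  by_cases hmark : number * number ≤ m ∧ m < 2 * N - number ∧ number ∣ (m - number * number)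
  · rw [if_pos hmark]
    simp only [Bool.false_eq_true, false_iff]
    rintro ⟨h2m, hforall⟩
    have hdvd : number ∣ m := by
      have h1 : number ∣ number * number := Dvd.intro number rfl
      have h2 : m = (m - number * number) + number * number := by omega
      rw [h2]; exact Nat.dvd_add hmark.2.2 h1
    exact hforall number hpr (le_refl _) ⟨hdvd, hmark.1⟩
  · rw [if_neg hmark, hold]
    constructor
    · rintro ⟨h2m, hforall⟩
      refine ⟨h2m, fun r hrp hrle hc => ?_⟩
      rcases Nat.lt_or_ge pc r with hgt | hle'
      · have hreq : r = number := by
          by_contra hne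
          exact hall r hgt (by omega) hrp
        subst hreq
        have : r ∣ m - r * r := Nat.dvd_sub hc.1 (Dvd.intro r rfl)
        exact hmark ⟨hc.2, hm, this⟩
      · exact hforall r hrp hle' hc
    · rintro ⟨h2m, hforall⟩
      exact ⟨h2m, fun r hrp hrle hc => hforall r hrp (by omega) hc⟩

theorem pvGood_init (N : Nat) (hN : 3 ≤ N) :
    pvGood (pvMarkA (#[false, false] ++ Array.replicate (2 * N - 2) true)
      (2 * 2) (2 * N - 2) 2) 2 (2 * N - 2) := by
  intro m hm
  rw [pvMarkA_getD _ _ _ _ _ (by omega), pvInit_getD]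
  by_cases hmm : 2 * 2 ≤ m ∧ m < 2 * N - 2 ∧ 2 ∣ (m - 2 * 2)
  · rw [if_pos hmm]
    simp only [Bool.false_eq_true, false_iff]
    rintro ⟨-, hforall⟩
    exact hforall 2 Nat.prime_two (le_refl 2) ⟨by omega, by omega⟩
  · rw [if_neg hmm, decide_eq_true_eq]
    constructor
    · rintro ⟨h2m, -⟩
      refine ⟨h2m, fun r hrp hrle hc => ?_⟩
      have hr2 : r = 2 := by have := hrp.two_le; omega
      subst hr2
      exact hmm ⟨by omega, by omega, by omega⟩
    · rintro ⟨h2m, -⟩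
      exact ⟨h2m, by omega⟩

theorem pvLoopA_eq_ideal (N : Nat) :
    ∀ (fuel : Nat) (sieve : Array Bool) (limit pc number : Nat),
      limit ≤ fuel + number → limit = 2 * N - pc →
      Nat.Prime pc → pc < number → 2 ≤ number →
      (∀ r, pc < r → r < number → ¬Nat.Prime r) →
      pvGood sieve pc limit →
      pvLoopA N fuel sieve limit pc number = pvIdeal N pc number := by
  intro fuel
  induction fuel with
  | zero =>
    intro sieve limit pc number h1 h2 hpc hlt h2n hall hg
    rw [pvIdeal, dif_neg (by omega)]
    rfl
  | succ fuel ih =>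
    intro sieve limit pc number h1 h2 hpc hlt h2n hall hg
    show (if number < limit then _ else ((pc : Int))) = _
    by_cases hcond : number < limit
    · rw [if_pos hcond]
      have hsp := pvSieve_prime_iff sieve pc limit number hg hcond h2n hlt hall
      by_cases hpr : Nat.Prime number
      · rw [if_pos (hsp.mpr hpr)]
        by_cases hNeq : number = N
        · rw [if_pos hNeq, pvIdeal, dif_pos (by omega), if_pos hpr, if_pos hNeq]
        · rw [if_neg hNeq]
          by_cases hgt : N < number
          · rw [if_pos hgt, pvIdeal, dif_pos (by omega), if_pos hpr, if_neg hNeq,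
              if_pos hgt]
          · rw [if_neg hgt, pvIdeal, dif_pos (by omega), if_pos hpr, if_neg hNeq,
              if_neg hgt]
            exact ih _ _ _ _ (by omega) rfl hpr (by omega) (by omega)
              (by intro r hr1 hr2; omega)
              (pvGood_step N pc number sieve hpr hlt hall (h2 ▸ hg))
      · rw [if_neg (fun hx => hpr (hsp.mp hx))]
        rw [pvIdeal, dif_pos (by omega), if_neg hpr]
        exact ih sieve limit pc (number + 1) (by omega) h2 hpc (by omega) (by omega)
          (by intro r hr1 hr2
              rcases Nat.lt_or_ge r number with h3 | h3
              · exact hall r hr1 h3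
              · have : r = number := by omega
                subst this; exact hpr)
          hg
    · rw [if_neg hcond, pvIdeal, dif_neg (by omega)]

theorem pvSearchB_correct (n : Int) (N : Nat) (hn : (N : Int) = n) (hN : 2 ≤ N)
    (hnp : ¬Nat.Prime N) :
    ∀ (fuel d : Nat), 1 ≤ d →
      d ≤ N - pvPrevP (N - 1) → d ≤ pvNextP (N + 1) - N →
      N - pvPrevP (N - 1) + 1 ≤ fuel + d →
      pvSearchB n (d : Int) fuel =
        (if pvNextP (N + 1) - N < N - pvPrevP (N - 1) then ((pvNextP (N + 1) : Nat) : Int)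
         else ((pvPrevP (N - 1) : Nat) : Int)) := by
  have hN4 : 4 ≤ N := by
    by_contra hc
    interval_cases N <;> exact hnp (by norm_num)
  have hp2 : 2 ≤ pvPrevP (N - 1) := Nat.le_findGreatest (by omega) Nat.prime_two
  have hpp : Nat.Prime (pvPrevP (N - 1)) := Nat.findGreatest_spec (m := 2) (by omega) Nat.prime_two
  have hple : pvPrevP (N - 1) ≤ N - 1 := Nat.findGreatest_le _
  have hpmax : ∀ k, pvPrevP (N - 1) < k → k ≤ N - 1 → ¬Nat.Prime k :=
    fun k h1 h2 => Nat.findGreatest_is_greatest h1 h2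
  have hq := pvNextP_spec (N + 1)
  set p := pvPrevP (N - 1) with hpdef
  set q := pvNextP (N + 1) with hqdef
  intro fuel
  induction fuel with
  | zero => intro d h1 h2 h3 h4; omega
  | succ fuel ih =>
    intro d h1 h2 h3 h4
    show (if pvIsPrime (n - (d : Int)) then _ else _) = _
    by_cases hdp : d = N - p
    · have hnd : n - (d : Int) = (p : Int) := by omega
      rw [hnd, if_pos ((pvIsPrime_iff _).mpr ⟨by omega, by simpa using hpp⟩)]
      rw [if_neg (show ¬(q - N < N - p) from by omega)]
    · have hd1 : d < N - p := by omega
      have hfalse1 : ¬(pvIsPrime (n - (d : Int)) = true) := by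
        rw [pvIsPrime_iff]
        rintro ⟨hge2, hprm⟩
        have hnd : (n - (d : Int)).toNat = N - d := by omega
        rw [hnd] at hprm
        exact hpmax (N - d) (by omega) (by omega) hprm
      rw [if_neg hfalse1]
      by_cases hdq : d = q - N
      · have hnd : n + (d : Int) = (q : Int) := by omega
        rw [hnd, if_pos ((pvIsPrime_iff _).mpr ⟨by have := hq.2.two_le; omega,
          by simpa using hq.2⟩)]
        rw [if_pos (show q - N < N - p from by omega)]
      · have hd2 : d < q - N := by omega
        have hfalse2 : ¬(pvIsPrime (n + (d : Int)) = true) := by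
          rw [pvIsPrime_iff]
          rintro ⟨hge2, hprm⟩
          have hnd : (n + (d : Int)).toNat = N + d := by omega
          rw [hnd] at hprm
          have := pvNextP_le hprm (show N + 1 ≤ N + d by omega)
          omega
        rw [if_neg hfalse2]
        have hcast : (d : Int) + 1 = ((d + 1 : Nat) : Int) := by push_cast; ring
        rw [hcast]
        exact ih (d + 1) (by omega) (by omega) (by omega) (by omega)

theorem pvLoopA_succ_eq (N fuel : Nat) (sieve : Array Bool) (limit pc number : Nat) :
    pvLoopA N (fuel + 1) sieve limit pc number =
      if number < limit then
        if sieve.getD number false then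
          if number = N then (N : Int)
          else if N < number then
            (if number - N < N - pc then (number : Int) else (pc : Int))
          else
            pvLoopA N fuel (pvMarkA sieve (number * number) (2 * N - number) number)
              (2 * N - number) number (number + 1)
        else pvLoopA N fuel sieve limit pc (number + 1)
      else (pc : Int) := rfl

theorem closest_prime_eq_answer (n : Int) (h2 : 2 ≤ n) :
    closest_prime n = pvAnswer n.toNat := by
  rw [closest_prime, if_neg (by omega)]
  obtain ⟨N, hn⟩ : ∃ N : Nat, (N : Int) = n := ⟨n.toNat, by omega⟩
  have hNt : n.toNat = N := by omega
  rw [hNt]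
  have hN2 : 2 ≤ N := by omega
  rw [show 2 * N = 2 * N - 1 + 1 from by omega, pvLoopA_succ_eq,
    show 2 * N - 1 + 1 = 2 * N from by omega]
  rw [if_pos (show 2 < 2 * N from by omega), pvInit_getD (2 * N - 2) 2]
  have hdec : decide (2 ≤ 2 ∧ 2 < 2 * N - 2 + 2) = true := by
    rw [decide_eq_true_eq]; omega
  rw [hdec, if_pos rfl]
  by_cases hNeq : 2 = N
  · rw [if_pos hNeq, pvAnswer, if_pos (hNeq ▸ Nat.prime_two)]
  · rw [if_neg hNeq, if_neg (show ¬(N < 2) from by omega)]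
    have hN3 : 3 ≤ N := by omega
    rw [pvLoopA_eq_ideal N (2 * N - 1) _ (2 * N - 2) 2 3 (by omega) (by omega)
      Nat.prime_two (by omega) (by omega) (by intro r h1 h2; omega)
      (pvGood_init N hN3)]
    exact pvIdeal_before N hN2 3 2 Nat.prime_two (by omega) (by omega)
      (by intro r h1 h2; omega)

theorem closest_prime_alt_eq_answer (n : Int) (h2 : 2 ≤ n) :
    closest_prime_alt n = pvAnswer n.toNat := by
  rw [closest_prime_alt, if_neg (by omega)]
  obtain ⟨N, hn⟩ : ∃ N : Nat, (N : Int) = n := ⟨n.toNat, by omega⟩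
  have hNt : n.toNat = N := by omega
  rw [hNt]
  have hN2 : 2 ≤ N := by omega
  by_cases hpr : pvIsPrime n = true
  · have hprN : Nat.Prime N := by
      have := ((pvIsPrime_iff n).mp hpr).2
      rwa [hNt] at this
    rw [if_pos hpr, pvAnswer, if_pos hprN]
    omega
  · rw [if_neg hpr]
    have hnp : ¬Nat.Prime N := by
      intro h
      exact hpr ((pvIsPrime_iff n).mpr ⟨by omega, hNt ▸ h⟩)
    have hN4 : 4 ≤ N := by
      by_contra hc
      interval_cases N <;> exact hnp (by norm_num)
    have hp2 : 2 ≤ pvPrevP (N - 1) := Nat.le_findGreatest (by omega) Nat.prime_two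
    have hple : pvPrevP (N - 1) ≤ N - 1 := Nat.findGreatest_le _
    have hq := pvNextP_spec (N + 1)
    rw [show (1 : Int) = ((1 : Nat) : Int) from by norm_num]
    rw [pvSearchB_correct n N hn hN2 hnp N 1 (le_refl 1) (by omega) (by omega) (by omega)]
    rw [pvAnswer, if_neg hnp]

-- ===== VERDICT (by name: the statement is the Claim_ definition above) =====
theorem closest_prime_spec : Claim_equal_closest_prime := by
  intro n _
  unfold Spec_closest_prime
  by_cases h : n ≤ 1
  · simp [closest_prime, closest_prime_alt, h]
  · rw [closest_prime_eq_answer n (by omega), closest_prime_alt_eq_answer n (by omega)]
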